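-- pv_equiv track=rewrite | github.com/coolperson111/hearbeatsound-anomaly-detection | src/DeepNetworks_Preprocessing/resize_and_savespecs.py | convertDupLocs
-- ===== SOURCE A (Python) =====
-- def convertDupLocs(input_list):
--     counts = {}
--     result = []
--     for item in input_list:
--         if item not in counts:
--             counts[item] = 1
--         else:
--             counts[item] += 1
--
--     for item in input_list:
--         if counts[item] == 0:
--             continue
--         if counts[item] > 1:
--             for i in range(1, counts[item] + 1):
--                 result.append(item + "_" + str(i))
--                 counts[item] = 0
--         else:
--             result.append(item)
--     return result
-- ===== SOURCE B (Python) =====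
-- def convertDupLocs(input_list):
--     counts = {}
--     for item in input_list:
--         counts[item] = counts.get(item, 0) + 1
--     result = []
--     for item, n in counts.items():
--         if n > 1:
--             result.extend(item + "_" + str(i) for i in range(1, n + 1))
--         else:
--             result.append(item)
--     return result
-- ===== Notes on version B (the rewrite author's own statement) =====
-- stated objective: simpler
-- what changed: B's second pass iterates once over the distinct keys of the counts dict (insertion order = first occurrence), eliminating A's re-scan of the whole input with its 'counts == 0: continue' skip and the in-loop re-zeroing of the counter.
import Mathlib
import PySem

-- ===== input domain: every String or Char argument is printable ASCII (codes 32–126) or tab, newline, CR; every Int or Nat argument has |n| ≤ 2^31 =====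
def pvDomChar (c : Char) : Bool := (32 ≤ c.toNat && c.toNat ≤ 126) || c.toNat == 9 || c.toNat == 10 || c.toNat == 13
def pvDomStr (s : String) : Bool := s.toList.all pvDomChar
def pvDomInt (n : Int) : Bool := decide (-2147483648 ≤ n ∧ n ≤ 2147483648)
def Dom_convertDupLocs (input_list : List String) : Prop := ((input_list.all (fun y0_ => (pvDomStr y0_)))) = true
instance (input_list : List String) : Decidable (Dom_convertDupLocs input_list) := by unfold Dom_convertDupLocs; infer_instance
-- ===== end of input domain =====

-- B replaces A's second pass over the whole input (with its `== 0` skip and in-loop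
-- re-zeroing of the counter) by a single pass over the distinct keys of the counts dict;
-- objective: simpler (same asymptotic cost).

-- ===== PORT A =====
-- second-loop body of A: reads counts[item] before any mutation, just as the Python does
def pvStep2 (st : PySem.Dict String Int × List String) (item : String) :
    PySem.Dict String Int × List String :=
  if st.1.getD item 0 = 0 then st
  else if 1 < st.1.getD item 0 then
    (PySem.List.pyRange 1 (st.1.getD item 0 + 1)).foldl
      (fun st2 i => (st2.1.insert item 0, st2.2 ++ [item ++ "_" ++ PySem.Int.toStr i])) st
  else (st.1, st.2 ++ [item])

def convertDupLocs (input_list : List String) : List String :=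
  let counts := input_list.foldl
    (fun c item =>
      if c.contains item = false then c.insert item 1
      else c.insert item (c.getD item 0 + 1)) PySem.Dict.empty
  (input_list.foldl pvStep2 (counts, [])).2

-- ===== PORT B =====
def convertDupLocs_alt (input_list : List String) : List String :=
  let counts := input_list.foldl
    (fun c item => c.insert item (c.getD item 0 + 1)) PySem.Dict.empty
  counts.items.foldl
    (fun result p =>
      if 1 < p.2 then
        result ++ (PySem.List.pyRange 1 (p.2 + 1)).map (fun i => p.1 ++ "_" ++ PySem.Int.toStr i)
      else result ++ [p.1]) []

-- ===== PRECONDITION & SPEC =====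
def Spec_convertDupLocs (input_list : List String) (out : List String) : Prop := out = convertDupLocs_alt input_list
instance (input_list : List String) (out : List String) : Decidable (Spec_convertDupLocs input_list out) := by unfold Spec_convertDupLocs; infer_instance

-- ===== CLAIM (what is proved, stated in full; the proofs are below) =====
def Claim_equal_convertDupLocs : Prop := ∀ (input_list : List String), Dom_convertDupLocs input_list → Spec_convertDupLocs input_list (convertDupLocs input_list)

-- ===== LEMMAS AND PROOFS =====

-- what both programs emit for a distinct item with total multiplicity `full x`
def pvEmit (full : String → Int) (x : String) : List String :=
  if 1 < full x then (PySem.List.pyRange 1 (full x + 1)).map (fun i => x ++ "_" ++ PySem.Int.toStr i)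
  else [x]

-- first occurrences, ignoring items already in `seen`
def pvDFirst : List String → List String → List String
  | _, [] => []
  | seen, x :: xs => if x ∈ seen then pvDFirst seen xs else x :: pvDFirst (x :: seen) xs

-- A's first loop builds exactly Counter(input_list)
lemma pvCountsA_eq (xs : List String) :
    xs.foldl
      (fun c item =>
        if c.contains item = false then c.insert item 1
        else c.insert item (c.getD item 0 + 1)) PySem.Dict.empty
      = PySem.Dict.counter xs := by
  have hstep :
      (fun (c : PySem.Dict String Int) item =>
        if c.contains item = false then c.insert item 1
        else c.insert item (c.getD item 0 + 1))
      = fun c item => c.insert item (c.getD item 0 + 1) := by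
    funext c item
    cases h : c.contains item with
    | false => simp [PySem.Dict.getD_of_not_contains c (0:Int) h]
    | true => simp
  rw [hstep, PySem.Dict.foldl_insert_getD_add_one_eq_counter]

-- the inner `for i in range(...)` loop: output side
lemma pvInner_snd (x : String) (g : Int → String) :
    ∀ (l : List Int) (st : PySem.Dict String Int × List String),
      (l.foldl (fun st2 i => (st2.1.insert x 0, st2.2 ++ [g i])) st).2 = st.2 ++ l.map g := by
  intro l
  induction l with
  | nil => intro st; simp
  | cons i l ih => intro st; simp [ih]

-- the inner loop: dict side (zeroes exactly the key x, when the range is nonempty)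
lemma pvInner_fst (x : String) (g : Int → String) :
    ∀ (l : List Int) (st : PySem.Dict String Int × List String) (y : String),
      (l.foldl (fun st2 i => (st2.1.insert x 0, st2.2 ++ [g i])) st).1.getD y 0
        = if y = x ∧ l ≠ [] then 0 else st.1.getD y 0 := by
  intro l
  induction l with
  | nil => intro st y; simp
  | cons i l ih =>
    intro st y
    simp only [List.foldl_cons]
    rw [ih]
    by_cases hy : y = x
    · subst hy
      simp [PySem.Dict.getD_insert_self]
    · simp [hy, PySem.Dict.getD_insert_of_ne st.1 (0:Int) 0 hy]

-- invariant for A's second loop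
lemma pvLoopA_eq (full : String → Int) :
    ∀ (xs : List String) (st : PySem.Dict String Int × List String) (seen : List String),
      (∀ x ∈ xs, 1 ≤ full x) →
      (∀ x ∈ xs, st.1.getD x 0 = if x ∈ seen then 0 else full x) →
      (∀ x ∈ xs, full x = 1 → x ∉ seen ∧ xs.count x = 1) →
      (xs.foldl pvStep2 st).2 = st.2 ++ (pvDFirst seen xs).flatMap (pvEmit full) := by
  intro xs
  induction xs with
  | nil => intro st seen _ _ _; simp [pvDFirst]
  | cons x rest ih =>
    intro st seen h1 h2 h3
    have hx : x ∈ x :: rest := List.mem_cons_self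
    have hcx := h2 x hx
    have hcount_rest : ∀ y ∈ rest, full y = 1 → rest.count y = 1 := by
      intro y hy hfy
      have hc := (h3 y (List.mem_cons_of_mem _ hy) hfy).2
      have h0 : 0 < rest.count y := List.count_pos_iff.mpr hy
      by_cases hyx : y = x
      · rw [hyx, List.count_cons_self] at hc
        rw [hyx] at h0 ⊢
        omega
      · rwa [List.count_cons_of_ne (fun h => hyx h.symm)] at hc
    simp only [List.foldl_cons]
    by_cases hseen : x ∈ seen
    · have hn : st.1.getD x 0 = 0 := by simp [hcx, hseen]
      have hstep : pvStep2 st x = st := by simp [pvStep2, hn]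
      rw [hstep, ih st seen (fun y hy => h1 y (List.mem_cons_of_mem _ hy))
        (fun y hy => h2 y (List.mem_cons_of_mem _ hy))
        (fun y hy hfy => ⟨(h3 y (List.mem_cons_of_mem _ hy) hfy).1, hcount_rest y hy hfy⟩)]
      simp [pvDFirst, hseen]
    · have hn : st.1.getD x 0 = full x := by simp [hcx, hseen]
      have h1x : 1 ≤ full x := h1 x hx
      by_cases hgt : 1 < full x
      · -- duplicate item: emit the whole group now, zero the key
        have hne : PySem.List.pyRange 1 (full x + 1) ≠ [] := by
          rw [PySem.List.pyRange_one_cons (by omega)]; simp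
        have hstep : pvStep2 st x
            = (PySem.List.pyRange 1 (full x + 1)).foldl
                (fun st2 i => (st2.1.insert x 0, st2.2 ++ [x ++ "_" ++ PySem.Int.toStr i])) st := by
          simp only [pvStep2, hn]
          rw [if_neg (by omega), if_pos hgt]
        rw [hstep]
        set st' := (PySem.List.pyRange 1 (full x + 1)).foldl
            (fun st2 i => (st2.1.insert x 0, st2.2 ++ [x ++ "_" ++ PySem.Int.toStr i])) st with hst'
        have hsnd := pvInner_snd x (fun i => x ++ "_" ++ PySem.Int.toStr i)
          (PySem.List.pyRange 1 (full x + 1)) st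
        have hfst := pvInner_fst x (fun i => x ++ "_" ++ PySem.Int.toStr i)
          (PySem.List.pyRange 1 (full x + 1)) st
        rw [ih st' (x :: seen) (fun y hy => h1 y (List.mem_cons_of_mem _ hy)
          ) ?_ ?_]
        · rw [← hst'] at hsnd
          rw [hsnd]
          simp [pvDFirst, hseen, pvEmit, hgt]
        · intro y hy
          rw [← hst'] at hfst
          rw [hfst y]
          by_cases hyx : y = x
          · simp [hyx, hne]
          · simp only [hyx, false_and, if_false]
            rw [h2 y (List.mem_cons_of_mem _ hy)]
            simp [List.mem_cons, hyx]
        · intro y hy hfy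
          have hyx : y ≠ x := by intro h; rw [h] at hfy; omega
          exact ⟨by simp [List.mem_cons, hyx, (h3 y (List.mem_cons_of_mem _ hy) hfy).1],
            hcount_rest y hy hfy⟩
      · -- unique item: emit it once
        have h1eq : full x = 1 := by omega
        have hstep : pvStep2 st x = (st.1, st.2 ++ [x]) := by
          simp only [pvStep2, hn]
          rw [if_neg (by omega), if_neg (by omega)]
        have hxrest : x ∉ rest := by
          have hc := (h3 x hx h1eq).2
          rw [List.count_cons_self] at hc
          exact List.count_eq_zero.mp (by omega)
        rw [hstep, ih (st.1, st.2 ++ [x]) (x :: seen)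
          (fun y hy => h1 y (List.mem_cons_of_mem _ hy)) ?_ ?_]
        · simp [pvDFirst, hseen, pvEmit, h1eq]
        · intro y hy
          have hyx : y ≠ x := fun h => hxrest (h ▸ hy)
          rw [h2 y (List.mem_cons_of_mem _ hy)]
          simp [List.mem_cons, hyx]
        · intro y hy hfy
          have hyx : y ≠ x := fun h => hxrest (h ▸ hy)
          exact ⟨by simp [List.mem_cons, hyx, (h3 y (List.mem_cons_of_mem _ hy) hfy).1],
            hcount_rest y hy hfy⟩

-- pvDFirst is Set.ofList filtered by `seen`
lemma pvDFirst_eq (xs : List String) :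
    ∀ seen, pvDFirst seen xs = (PySem.Set.ofList xs).filter (fun y => decide (y ∉ seen)) := by
  induction xs with
  | nil => intro seen; simp [pvDFirst, PySem.Set.ofList_nil]
  | cons x xs ih =>
    intro seen
    rw [PySem.Set.ofList_cons]
    simp only [PySem.Set.discard, pvDFirst]
    by_cases hseen : x ∈ seen
    · rw [if_pos hseen, List.filter_cons_of_neg (by simp [hseen]), ih seen,
        List.filter_filter]
      apply List.filter_congr
      intro y _
      by_cases hy : y ∈ seen <;> by_cases hyx : y = x <;> simp_all
    · rw [if_neg hseen, List.filter_cons_of_pos (by simp [hseen]), ih (x :: seen),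
        List.filter_filter]
      congr 1
      apply List.filter_congr
      intro y _
      by_cases hy : y ∈ seen <;> by_cases hyx : y = x <;> simp_all

lemma pvA_closed (xs : List String) :
    convertDupLocs xs = (PySem.Set.ofList xs).flatMap (pvEmit fun y => (xs.count y : Int)) := by
  show (xs.foldl pvStep2 (_, [])).2 = _
  rw [pvCountsA_eq]
  rw [pvLoopA_eq (fun y => (xs.count y : Int)) xs (PySem.Dict.counter xs, []) []]
  · rw [pvDFirst_eq]
    simp
  · intro y hy
    have := List.count_pos_iff.mpr hy
    omega
  · intro y _
    simp [PySem.Dict.getD_counter]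
  · intro y hy hfy
    refine ⟨by simp, ?_⟩
    exact_mod_cast hfy

lemma pvB_closed (xs : List String) :
    convertDupLocs_alt xs = (PySem.Set.ofList xs).flatMap (pvEmit fun y => (xs.count y : Int)) := by
  simp only [convertDupLocs_alt]
  rw [PySem.Dict.foldl_insert_getD_add_one_eq_counter, PySem.Dict.items_counter]
  have hstep :
      (fun (result : List String) (p : String × Int) =>
        if 1 < p.2 then
          result ++ (PySem.List.pyRange 1 (p.2 + 1)).map (fun i => p.1 ++ "_" ++ PySem.Int.toStr i)
        else result ++ [p.1])
      = fun result p => result ++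
          (if 1 < p.2 then (PySem.List.pyRange 1 (p.2 + 1)).map (fun i => p.1 ++ "_" ++ PySem.Int.toStr i)
           else [p.1]) := by
    funext result p
    split <;> rfl
  rw [hstep, PySem.List.foldl_append_eq_flatMap]
  rw [List.flatMap_map]
  congr 1

-- ===== VERDICT (by name: the statement is the Claim_ definition above) =====
theorem convertDupLocs_spec : Claim_equal_convertDupLocs := by
  intro input_list _
  unfold Spec_convertDupLocs
  rw [pvA_closed, pvB_closed]
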